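-- pv_equiv track=rewrite | github.com/kssumin/algorithm-study | season4/week1/jiho/fruiterer.py | solution
-- ===== SOURCE A (Python) =====
-- def solution(k, m, score):
--     answer = 0
--     score = sorted(score, reverse=True)
--
--     for i in range(0, len(score), m):
--         a = score[i:i+m]
--         if len(a) == m:
--             answer += min(a) * m
--
--     return answer
-- ===== SOURCE B (Python) =====
-- def solution(k, m, score):
--     s = sorted(score)
--     return m * sum(s[len(s) % m::m])
-- ===== Notes on version B (the rewrite author's own statement) =====
-- stated objective: simpler
-- what changed: B sorts ascending (not descending), observes that the leftover len%m smallest elements are exactly the discarded incomplete group and that every m-th element after them is a group minimum, and returns m times the sum of one strided slice -- no grouping loop, no slices per group, no min scans.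
-- outside the precondition, e.g. on solution(0, -2, [1, 2, 3]): A returns 0, B returns -8
import Mathlib
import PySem

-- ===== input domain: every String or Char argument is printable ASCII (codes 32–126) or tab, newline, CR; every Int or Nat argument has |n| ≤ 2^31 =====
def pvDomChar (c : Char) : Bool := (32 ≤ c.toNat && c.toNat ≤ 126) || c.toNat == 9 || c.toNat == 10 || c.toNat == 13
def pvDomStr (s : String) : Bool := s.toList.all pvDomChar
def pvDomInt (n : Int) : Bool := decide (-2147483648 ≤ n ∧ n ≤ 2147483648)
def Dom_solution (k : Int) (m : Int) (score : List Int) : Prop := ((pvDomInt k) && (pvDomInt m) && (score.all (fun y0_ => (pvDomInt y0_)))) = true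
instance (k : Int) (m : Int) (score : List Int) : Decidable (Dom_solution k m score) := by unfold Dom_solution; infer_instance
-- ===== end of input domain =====

-- B sorts ascending instead of descending and returns m times the sum of ONE strided
-- slice s[len(s)%m::m] (each element of which is a complete group's minimum): the
-- per-group slicing loop and the min scans disappear; objective: simpler.

-- ===== PORT A =====
def solution (k : Int) (m : Int) (score : List Int) : Int :=
  let s := PySem.List.sorted score (fun x => x) true
  (PySem.List.pyRange 0 (s.length : Int) m).foldl
    (fun answer i =>
      let a := PySem.List.slice s (some i) (some (i + m))
      if (a.length : Int) = m then
        answer + (PySem.List.min? a (fun x => x)).getD 0 * m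
      else answer) 0

-- ===== PORT B =====
def solution_alt (k : Int) (m : Int) (score : List Int) : Int :=
  let s := PySem.List.sorted score (fun x => x) false
  m * ((PySem.List.slice? s (some (PySem.Int.mod (s.length : Int) m)) none m).getD []).sum

-- ===== PRECONDITION & SPEC =====
-- Pre_ restricts to the natural domain of a positive group size m: at m = 0 both
-- programs raise (A: ValueError from range step 0, B: ZeroDivisionError from len%m);
-- for m < 0 — a nonsensical negative group size — A's empty range accidentally
-- returns 0 while B's negative-step slice picks other elements.
def Pre_solution (k : Int) (m : Int) (score : List Int) : Prop := 0 < m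
instance (k : Int) (m : Int) (score : List Int) : Decidable (Pre_solution k m score) := by unfold Pre_solution; infer_instance
def pvWitness_solution : Int × Int × List Int := (4, 3, [4, 1, 2, 5, 2, 1, 9])

def Spec_solution (k : Int) (m : Int) (score : List Int) (out : Int) : Prop := out = solution_alt k m score
instance (k : Int) (m : Int) (score : List Int) (out : Int) : Decidable (Spec_solution k m score out) := by unfold Spec_solution; infer_instance

-- ===== CLAIM (what is proved, stated in full; the proofs are below) =====
def Claim_equal_solution : Prop := ∀ (k : Int) (m : Int) (score : List Int), Dom_solution k m score → Pre_solution k m score → Spec_solution k m score (solution k m score)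

-- ===== LEMMAS AND PROOFS =====

-- the common value both programs compute: sum over complete groups (peeled from the
-- front of the DESCENDING list) of (group minimum)*m
def chunkSum (m : Int) (s : List Int) : Int :=
  if h : 0 < m ∧ m ≤ (s.length : Int) then
    (PySem.List.pyGet? s (m - 1)).getD 0 * m + chunkSum m (s.drop m.toNat)
  else 0
termination_by s.length
decreasing_by
  simp only [List.length_drop]
  omega

lemma pyRange_pos_nil (a b step : Int) (hs : 0 < step) (hab : b ≤ a) :
    PySem.List.pyRange a b step = [] := by
  rw [PySem.List.pyRange_of_pos a b hs, if_neg (by omega)]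
  simp

lemma pyRange_pos_cons (a b step : Int) (hs : 0 < step) (hab : a < b) :
    PySem.List.pyRange a b step = a :: PySem.List.pyRange (a + step) b step := by
  rw [PySem.List.pyRange_of_pos a b hs, PySem.List.pyRange_of_pos (a + step) b hs,
    if_pos hab]
  have hd : (b - a + step - 1) / step = (b - a - 1) / step + 1 := by
    have : b - a + step - 1 = (b - a - 1) + 1 * step := by ring
    rw [this, Int.add_mul_ediv_right _ _ (by omega)]
  have hnn : 0 ≤ (b - a - 1) / step := Int.ediv_nonneg (by omega) (by omega)
  have hcnt : (b - a + step - 1) / step = (((b - a - 1) / step).toNat : Int) + 1 := by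
    omega
  have htl : (if a + step < b then ((b - (a + step) + step - 1) / step).toNat else 0)
      = ((b - a - 1) / step).toNat := by
    split_ifs with h
    · congr 1; congr 1; ring
    · have : (b - a - 1) / step = 0 := Int.ediv_eq_zero_of_lt (by omega) (by omega)
      omega
  rw [htl]
  have : ((b - a + step - 1) / step).toNat = ((b - a - 1) / step).toNat + 1 := by omega
  rw [this, List.range_succ_eq_map]
  simp only [List.map_cons, List.map_map, Nat.cast_zero, mul_zero, add_zero]
  congr 1
  apply List.map_congr_left
  intro k _
  simp only [Function.comp_apply]
  push_cast
  ring

lemma pyRange_shift (a b c step : Int) (hs : 0 < step) :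
    PySem.List.pyRange (a + c) (b + c) step = (PySem.List.pyRange a b step).map (fun x => c + x) := by
  rw [PySem.List.pyRange_of_pos _ _ hs, PySem.List.pyRange_of_pos _ _ hs,
      show b + c - (a + c) = b - a by ring, List.map_map]
  simp only [add_lt_add_iff_right]
  apply List.map_congr_left
  intro k _
  simp only [Function.comp_apply]
  ring

lemma min_take_eq (s : List Int) (m' : Nat) (h0 : 0 < m') (hle : m' ≤ s.length)
    (hp : s.Pairwise (fun a b => b ≤ a)) :
    (PySem.List.min? (s.take m') (fun x => x)).getD 0 = s[m' - 1]'(by omega) := by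
  have hlen : (s.take m').length = m' := by simp; omega
  have hne : s.take m' ≠ [] := by
    intro h; rw [h] at hlen; simp at hlen; omega
  obtain ⟨m₀, hm₀⟩ : ∃ m₀, PySem.List.min? (s.take m') (fun x => x) = some m₀ := by
    cases hmin : PySem.List.min? (s.take m') (fun x => x) with
    | none => exact absurd ((PySem.List.min?_eq_none_iff _ _).mp hmin) hne
    | some v => exact ⟨v, rfl⟩
  rw [hm₀]; simp only [Option.getD_some]
  have hmem : m₀ ∈ s.take m' := PySem.List.min?_mem hm₀
  have hmin : ∀ y ∈ s.take m', m₀ ≤ y := by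
    intro y hy
    exact PySem.List.min?_isMin hm₀ y hy
  have hlast : s[m' - 1]'(by omega) ∈ s.take m' := by
    have : (s.take m')[m' - 1]'(by omega) ∈ s.take m' := List.getElem_mem _
    rwa [List.getElem_take] at this
  have h1 : m₀ ≤ s[m' - 1]'(by omega) := hmin _ hlast
  have h2 : s[m' - 1]'(by omega) ≤ m₀ := by
    obtain ⟨j, hj, hjv⟩ := List.getElem_of_mem hmem
    rw [List.getElem_take] at hjv
    rcases Nat.lt_or_ge j (m' - 1) with hjl | hjl
    · have := (List.pairwise_iff_getElem.mp hp) j (m' - 1) (by omega) (by omega) (by omega)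
      rw [hjv] at this
      exact this
    · have : j = m' - 1 := by omega
      subst this; rw [hjv]
  omega

lemma slice_shift (s : List Int) (m : Int) (m' : Nat) (hm : m = (m' : Int)) (i : Int) (hi : 0 ≤ i) :
    PySem.List.slice s (some (m + i)) (some (m + i + m)) =
      PySem.List.slice (s.drop m') (some i) (some (i + m)) := by
  subst hm
  rw [PySem.List.slice_toNat s (by omega) (by omega),
      PySem.List.slice_toNat (s.drop m') hi (by omega)]
  rw [List.drop_drop,
      show ((m' : Int) + i).toNat = m' + i.toNat from by omega,
      show ((m' : Int) + i + (m' : Int)).toNat = m' + i.toNat + m' from by omega,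
      show (i + (m' : Int)).toNat = i.toNat + m' from by omega]
  congr 1
  omega

lemma foldA_eq (m : Int) (hm : 0 < m) :
    ∀ (n : Nat) (s : List Int), s.length = n → s.Pairwise (fun a b => b ≤ a) → ∀ acc : Int,
    (PySem.List.pyRange 0 (s.length : Int) m).foldl
      (fun answer i =>
        let a := PySem.List.slice s (some i) (some (i + m))
        if (a.length : Int) = m then
          answer + (PySem.List.min? a (fun x => x)).getD 0 * m
        else answer) acc
    = acc + chunkSum m s := by
  intro n
  induction n using Nat.strong_induction_on with
  | _ n IH =>
    intro s hn hp acc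
    rcases Nat.eq_zero_or_pos n with h0 | h0
    · subst h0
      rw [hn, pyRange_pos_nil 0 ((0 : Nat) : Int) m hm (by simp)]
      rw [chunkSum, dif_neg (by omega)]
      simp
    · rw [hn, pyRange_pos_cons 0 n m hm (by exact_mod_cast h0), zero_add]
      simp only [List.foldl_cons]
      rcases le_or_gt m (n : Int) with hmn | hmn
      · -- complete first group
        set m' := m.toNat with hm'
        have hmm : m = (m' : Int) := by omega
        have hm'n : m' ≤ n := by omega
        -- head term
        have hslice : PySem.List.slice s (some 0) (some (0 + m)) = s.take m' := by
          rw [zero_add]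
          simp only [PySem.List.slice_zero_start]
          rw [PySem.List.slice_to s (by omega)]
        have hlen : ((PySem.List.slice s (some 0) (some (0 + m))).length : Int) = m := by
          rw [hslice]; simp; omega
        rw [if_pos hlen] at *
        rw [hslice]
        have hminv : (PySem.List.min? (s.take m') (fun x => x)).getD 0 = s[m' - 1]'(by omega) :=
          min_take_eq s m' (by omega) (by omega) hp
        -- tail range: shift by m
        have hsh : PySem.List.pyRange m (s.length : Int) m
            = (PySem.List.pyRange 0 ((s.length : Int) - m) m).map (fun x => m + x) := by
          have := pyRange_shift 0 ((s.length : Int) - m) m m hm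
          simpa using this
        rw [hn] at hsh
        rw [hsh, List.foldl_map]
        have hcongr : ∀ (acc2 : Int), ∀ i ∈ PySem.List.pyRange 0 ((n : Int) - m) m,
            (fun answer i =>
              let a := PySem.List.slice s (some i) (some (i + m))
              if (a.length : Int) = m then
                answer + (PySem.List.min? a (fun x => x)).getD 0 * m
              else answer) acc2 (m + i)
            = (fun answer i =>
              let a := PySem.List.slice (s.drop m') (some i) (some (i + m))
              if (a.length : Int) = m then
                answer + (PySem.List.min? a (fun x => x)).getD 0 * m
              else answer) acc2 i := by
          intro acc2 i hi
          have h0i : 0 ≤ i := ((PySem.List.mem_pyRange_iff_of_pos hm i).mp hi).1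
          simp only
          rw [show m + i + m = m + (i + m) by ring] at *
          rw [show PySem.List.slice s (some (m + i)) (some (m + (i + m)))
              = PySem.List.slice (s.drop m') (some i) (some (i + m)) from by
            have := slice_shift s m m' hmm i h0i
            rwa [show m + i + m = m + (i + m) by ring] at this]
        rw [PySem.List.foldl_congr_mem _ _ _ _ (fun acc2 x hx => hcongr acc2 x hx)]
        have hdl : ((s.drop m').length : Int) = (n : Int) - m := by simp; omega
        have := IH (n - m') (by omega) (s.drop m') (by rw [List.length_drop, hn]) (hp.drop)
          (acc + s[m' - 1]'(by omega) * m)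
        rw [hdl] at this
        rw [hminv, this]
        -- fold chunkSum on the right-hand side
        conv_rhs => rw [chunkSum]
        rw [dif_pos ⟨hm, by rw [hn]; omega⟩]
        have hget : (PySem.List.pyGet? s (m - 1)).getD 0 = s[m' - 1]'(by omega) := by
          rw [show m - 1 = ((m' - 1 : Nat) : Int) by omega, PySem.List.pyGet?_natCast,
              List.getElem?_eq_getElem (by omega)]
          simp
        rw [hget, ← hm']
        ring
      · -- incomplete (or empty-tail) first group: 0 < n < m
        have hslice : PySem.List.slice s (some 0) (some (0 + m)) = s.take m.toNat := by
          rw [zero_add]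
          simp only [PySem.List.slice_zero_start]
          rw [PySem.List.slice_to s (by omega)]
        have hlen : ((PySem.List.slice s (some 0) (some (0 + m))).length : Int) = (n : Int) := by
          rw [hslice]; simp; omega
        rw [if_neg (by omega)]
        rw [pyRange_pos_nil m (n : Int) m hm (by omega)]
        rw [chunkSum, dif_neg (by rw [hn]; omega)]
        simp

lemma filterMap_eq_map_of_forall {α β : Type} (l : List α) (f : α → Option β) (g : α → β)
    (h : ∀ x ∈ l, f x = some (g x)) : l.filterMap f = l.map g := by
  induction l with
  | nil => rfl
  | cons a t ih =>
    rw [List.filterMap_cons, h a (by simp), List.map_cons, ih (fun x hx => h x (by simp [hx]))]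

-- the strided slice s[r::m] (r = len % m, 0 < m) is exactly the list of elements
-- at indices r, r+m, …, r+(q-1)m where q = len // m
lemma slice_strided (m' : Nat) (hm : 0 < m') (t : List Int) :
    PySem.List.slice? t (some ((t.length % m' : Nat) : Int)) none ((m' : Nat) : Int)
      = some ((List.range (t.length / m')).map (fun j => t.getD (t.length % m' + j * m') 0)) := by
  have hr : t.length % m' < m' := Nat.mod_lt _ hm
  have hqr := Nat.div_add_mod t.length m'
  set n := t.length with hn
  set r := n % m' with hrdef
  set q := n / m' with hqdef
  simp only [PySem.List.slice?, PySem.List.sliceIndices]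
  rw [if_neg (by exact_mod_cast hm.ne')]
  simp only [← hn]
  have h1 : ¬((m' : Int) < 0) := by omega
  have h2 : ¬((r : Int) < 0) := by omega
  have h3 : (0 : Int) < (m' : Int) := by exact_mod_cast hm
  have hrn : r ≤ n := Nat.mod_le _ _
  simp only [if_neg h1, if_neg h2, if_pos h3,
    min_eq_left (show (r : Int) ≤ (n : Int) by exact_mod_cast hrn)]
  have hcount : (if (r : Int) < (n : Int) then (((n : Int) - r + m' - 1) / m').toNat else 0) = q := by
    split_ifs with h
    · have hnr : (n : Int) - r = (m' : Int) * q := by push_cast; omega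
      rw [show (n : Int) - ↑r + ↑m' - 1 = (↑m' - 1) + ↑q * ↑m' by linear_combination hnr,
        Int.add_mul_ediv_right _ _ (by omega), Int.ediv_eq_zero_of_lt (by omega) (by omega)]
      simp
    · have hrn' : r = n := by omega
      have hq0 : m' * q = 0 := by omega
      have : q = 0 := (Nat.mul_eq_zero.mp hq0).resolve_left hm.ne'
      omega
  rw [hcount]
  congr 1
  apply filterMap_eq_map_of_forall
  intro j hj
  have hjq : j < q := List.mem_range.mp hj
  have hlt : r + m' * j < n := by
    have h4 : m' * (j + 1) ≤ m' * q := Nat.mul_le_mul_left m' hjq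
    have h5 : m' * j + m' = m' * (j + 1) := by ring
    omega
  rw [show (r : Int) + ↑m' * ↑j = ((r + m' * j : Nat) : Int) by push_cast [Nat.cast_add]; ring,
    Int.toNat_natCast, List.getElem?_eq_getElem hlt,
    List.getD_eq_getElem t 0 (show r + j * m' < n by rwa [Nat.mul_comm m' j] at hlt)]
  congr 2
  ring

-- chunkSum over the reversed (descending) list = sum of the strided picks of the ascending list
lemma chunk_rev (m' : Nat) (hm : 0 < m') :
    ∀ (n : Nat) (t : List Int), t.length = n →
    chunkSum ((m' : Nat) : Int) t.reverse
      = ((List.range (n / m')).map (fun j => t.getD (n % m' + j * m') 0)).sum * (m' : Int) := by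
  intro n
  induction n using Nat.strong_induction_on with
  | _ n IH =>
    intro t hn
    rcases lt_or_ge n m' with hlt | hge
    · have hq : n / m' = 0 := Nat.div_eq_of_lt hlt
      rw [chunkSum, dif_neg (by simp [hn]; omega), hq]
      simp
    · have hq1 : 1 ≤ n / m' := (Nat.one_le_div_iff hm).mpr hge
      obtain ⟨p, hp⟩ : ∃ p, n / m' = p + 1 := ⟨n / m' - 1, by omega⟩
      have hqr := Nat.div_add_mod n m'
      have hrm : n % m' < m' := Nat.mod_lt _ hm
      rw [hp] at hqr
      have hnm : n - m' = m' * p + n % m' := by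
        have : m' * (p + 1) = m' * p + m' := by ring
        omega
      rw [chunkSum, dif_pos ⟨by exact_mod_cast hm, by simp [hn]; exact_mod_cast hge⟩]
      have hdrop : t.reverse.drop ((m' : Int)).toNat = (t.take (n - m')).reverse := by
        rw [Int.toNat_natCast, List.drop_reverse, hn]
      rw [hdrop, IH (n - m') (by omega) (t.take (n - m')) (by simp; omega)]
      have hdiv : (n - m') / m' = p := by
        rw [hnm, Nat.mul_add_div hm, Nat.div_eq_of_lt hrm, Nat.add_zero]
      have hmod : (n - m') % m' = n % m' := by
        rw [hnm, Nat.mul_add_mod, Nat.mod_eq_of_lt hrm]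
      rw [hdiv, hmod]
      have hhead : (PySem.List.pyGet? t.reverse ((m' : Int) - 1)).getD 0
          = t.getD (n % m' + p * m') 0 := by
        rw [show (m' : Int) - 1 = ((m' - 1 : Nat) : Int) by omega, PySem.List.pyGet?_natCast,
          List.getElem?_reverse (by omega)]
        rw [hn,
          show n - 1 - (m' - 1) = n % m' + p * m' by have : p * m' = m' * p := Nat.mul_comm p m'; omega]
        rw [List.getD_eq_getElem?_getD]
      rw [hhead]
      have htake : ∀ j ∈ List.range p,
          (t.take (n - m')).getD (n % m' + j * m') 0 = t.getD (n % m' + j * m') 0 := by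
        intro j hj
        have hjp : j < p := List.mem_range.mp hj
        have hidx : n % m' + j * m' < n - m' := by
          have h4 : (j + 1) * m' ≤ p * m' := Nat.mul_le_mul_right m' hjp
          have h5 : (j + 1) * m' = j * m' + m' := by ring
          have h6 : p * m' = m' * p := Nat.mul_comm p m'
          omega
        rw [List.getD_eq_getElem?_getD, List.getD_eq_getElem?_getD, List.getElem?_take]
        rw [if_pos hidx]
      rw [List.map_congr_left htake, hp, List.range_succ, List.map_append, List.sum_append]
      simp only [List.map_cons, List.map_nil, List.sum_cons, List.sum_nil]
      ring

lemma sorted_desc_eq_reverse (xs : List Int) :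
    PySem.List.sorted xs (fun x => x) true = (PySem.List.sorted xs (fun x => x) false).reverse := by
  apply List.eq_of_perm_of_sorted (le := fun a b : Int => b ≤ a)
  · intro a b _ _ h1 h2; omega
  · simpa using PySem.List.sorted_pairwise_rev xs (fun x => x)
  · rw [List.pairwise_reverse]
    simpa using PySem.List.sorted_pairwise xs (fun x => x)
  · exact (PySem.List.sorted_perm ..).trans
      (((PySem.List.sorted_perm xs (fun x => x) false).symm).trans (List.reverse_perm _).symm)

-- ===== VERDICT (by name: the statement is the Claim_ definition above) =====
theorem solution_spec : Claim_equal_solution := by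
  intro k m score _ hpre
  have hm0 : 0 < m := hpre
  simp only [Spec_solution, solution, solution_alt]
  obtain ⟨m', rfl⟩ : ∃ m' : Nat, m = ((m' : Nat) : Int) := ⟨m.toNat, by omega⟩
  have hm' : 0 < m' := by exact_mod_cast hm0
  rw [sorted_desc_eq_reverse]
  set t := PySem.List.sorted score (fun x => x) false with ht
  have hp : t.reverse.Pairwise (fun a b : Int => b ≤ a) := by
    rw [List.pairwise_reverse]
    simpa using PySem.List.sorted_pairwise score (fun x => x)
  rw [foldA_eq _ hm0 t.reverse.length t.reverse rfl hp 0, zero_add]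
  rw [show PySem.Int.mod ((t.length : Nat) : Int) ((m' : Nat) : Int)
      = ((t.length % m' : Nat) : Int) from PySem.Int.mod_natCast t.length m']
  rw [slice_strided m' hm' t, Option.getD_some]
  rw [chunk_rev m' hm' t.length t rfl]
  ring
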